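-- pv_equiv track=rewrite | github.com/Ivan1905/starter-kits | alert-combiner-py/src/agent.py | is_address
-- ===== SOURCE A (Python) =====
-- def is_address(w3, addresses: str) -> bool:
--     """
--     this function determines whether address is a valid address
--     :return: is_address: bool
--     """
--     if addresses is None:
--         return True
--
--     is_address = True
--     for address in addresses.split(','):
--         for c in ['a', 'b', 'c', 'd', 'e', 'f', '0', '1', '2', '3', '4', '5', '6', '7', '8', '9']:
--             test_str = c + c + c + c + c + c + c + c + c  # make a string of length 9; I know this is ugly, but regex didnt work
--             if test_str in address.lower():
--                 is_address = False
--
--     return is_address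
-- ===== SOURCE B (Python) =====
-- def is_address(w3, addresses: str) -> bool:
--     """Single left-to-right pass per comma segment tracking the current
--     run length of repeated characters, instead of 16 substring searches."""
--     if addresses is None:
--         return True
--
--     for address in addresses.split(','):
--         run = 0
--         prev = ','  # run == 0 makes the first comparison irrelevant
--         for ch in address.lower():
--             run = run + 1 if ch == prev else 1
--             prev = ch
--             if run >= 9 and ch in 'abcdef0123456789':
--                 return False
--     return True
-- ===== Notes on version B (the rewrite author's own statement) =====
-- stated objective: simpler
-- what changed: Replaces the 16 length-9 substring searches per comma segment by a single left-to-right pass that counts the current run of repeated characters and fails as soon as a run of 9 hex/digit characters is seen.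
import Mathlib
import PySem

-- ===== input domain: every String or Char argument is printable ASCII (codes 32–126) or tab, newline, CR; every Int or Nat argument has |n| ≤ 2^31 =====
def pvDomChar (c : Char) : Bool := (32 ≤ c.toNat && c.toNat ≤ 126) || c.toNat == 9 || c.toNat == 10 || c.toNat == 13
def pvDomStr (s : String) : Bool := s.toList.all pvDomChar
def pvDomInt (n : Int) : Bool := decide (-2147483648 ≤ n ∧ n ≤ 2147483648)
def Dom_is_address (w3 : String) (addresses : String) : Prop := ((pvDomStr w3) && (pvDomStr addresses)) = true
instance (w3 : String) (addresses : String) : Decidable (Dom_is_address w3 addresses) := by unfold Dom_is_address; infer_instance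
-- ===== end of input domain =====

-- B replaces A's 16 length-9 substring searches per comma segment by one
-- run-length counting pass per segment (objective: simpler).


-- ===== PORT A =====
-- the 16-element list A loops over
def pvHexList : List Char := ['a', 'b', 'c', 'd', 'e', 'f', '0', '1', '2', '3', '4', '5', '6', '7', '8', '9']

-- literal transliteration of A (addresses : String, so Python's 'addresses is None' branch is vacuous)
def is_address (w3 : String) (addresses : String) : Bool :=
  (PySem.Chars.splitOn addresses.toList [',']).foldl
    (fun is_addr address =>
      pvHexList.foldl
        (fun acc c =>
          let test_str := [c, c, c, c, c, c, c, c, c]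
          if PySem.Chars.isIn test_str (PySem.Chars.lower address) then false else acc)
        is_addr)
    true

-- ===== PORT B =====
-- the constant string B tests membership in
def pvHexStr : List Char := "abcdef0123456789".toList

-- the inner for-loop of B: previous char and current run length; true = run of 9 hex chars found
def pvScan : List Char → Char → Nat → Bool
  | [], _, _ => false
  | ch :: rest, prev, run =>
    let run' := if ch == prev then run + 1 else 1
    if 9 ≤ run' ∧ pvHexStr.contains ch then true else pvScan rest ch run'

def is_address_alt (w3 : String) (addresses : String) : Bool :=
  !((PySem.Chars.splitOn addresses.toList [',']).any
      (fun address => pvScan (PySem.Chars.lower address) ',' 0))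

-- ===== PRECONDITION & SPEC =====
def Spec_is_address (w3 : String) (addresses : String) (out : Bool) : Prop := out = is_address_alt w3 addresses
instance (w3 : String) (addresses : String) (out : Bool) : Decidable (Spec_is_address w3 addresses out) := by unfold Spec_is_address; infer_instance

-- ===== CLAIM (what is proved, stated in full; the proofs are below) =====
def Claim_equal_is_address : Prop := ∀ (w3 : String) (addresses : String), Dom_is_address w3 addresses → Spec_is_address w3 addresses (is_address w3 addresses)

-- ===== LEMMAS AND PROOFS =====

-- the two hex-character containers hold the same characters
lemma pv_hex_eq : pvHexStr = pvHexList := by decide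

-- A's flag-setting inner loop is 'acc && no hex run-string occurs'
lemma pv_foldl_flag (cs : List Char) (p : Char → Bool) (acc : Bool) :
    cs.foldl (fun a c => if p c then false else a) acc = (acc && !(cs.any p)) := by
  induction cs generalizing acc with
  | nil => simp
  | cons c cs ih =>
    simp only [List.foldl_cons, List.any_cons, ih]
    by_cases h : p c = true <;> simp [h]

-- A's outer flag loop over the segments
lemma pv_foldl_outer (segs : List (List Char)) (q : List Char → Bool) (acc : Bool) :
    segs.foldl (fun a s => (a && !(q s))) acc = (acc && !(segs.any q)) := by
  induction segs generalizing acc with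
  | nil => simp
  | cons s segs ih => simp [List.foldl_cons, ih, Bool.and_assoc]

-- decomposition of an infix occurrence across an append
lemma pv_infix_append_cases {α : Type} {u a b : List α} (h : u <:+: a ++ b) :
    u <:+: a ∨ u <:+: b ∨ ∃ u1 u2, u = u1 ++ u2 ∧ u1 ≠ [] ∧ u1 <:+ a ∧ u2 <+: b := by
  obtain ⟨p, q, hpq⟩ := h
  have h1 : p ++ (u ++ q) = a ++ b := by simpa [List.append_assoc] using hpq
  rcases List.append_eq_append_iff.mp h1 with ⟨a', ha, hb⟩ | ⟨c', hp, hb⟩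
  · rcases List.append_eq_append_iff.mp hb with ⟨w, hw1, hw2⟩ | ⟨w, hw1, hw2⟩
    · -- a' = u ++ w : a = p ++ u ++ w, so u <:+: a
      left
      exact ⟨p, w, by rw [ha, hw1]; simp [List.append_assoc]⟩
    · -- u = a' ++ w, a = p ++ a', b = w ++ q
      by_cases ha' : a' = []
      · right; left
        subst ha'
        simp only [List.nil_append] at hw1
        exact ⟨[], q, by simp [hw1, hw2]⟩
      · right; right
        exact ⟨a', w, hw1, ha', ⟨p, ha.symm⟩, ⟨q, hw2.symm⟩⟩
  · -- p = a ++ c', b = c' ++ u ++ q : u infix of b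
    right; left
    exact ⟨c', q, by simp [hb, List.append_assoc]⟩
-- the run-length scan finds exactly the occurrences of a 9-repeated hex char
lemma pv_scan_spec (l : List Char) (p : Char) (r : Nat)
    (hinv : pvHexStr.contains p = true → r < 9) :
    pvScan l p r = true ↔
      ∃ c, pvHexStr.contains c = true ∧ List.replicate 9 c <:+: (List.replicate r p ++ l) := by
  induction l generalizing p r with
  | nil =>
    simp only [pvScan, List.append_nil]
    constructor
    · intro h; exact absurd h (by simp)
    · rintro ⟨c, hc, hinf⟩
      have h9 : (List.replicate 9 c).length ≤ (List.replicate r p).length := hinf.length_le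
      simp only [List.length_replicate] at h9
      have hcp : c = p := List.eq_of_mem_replicate (hinf.mem (by simp))
      exact absurd (hinv (hcp ▸ hc)) (by omega)
  | cons ch rest ih =>
    simp only [pvScan]
    by_cases hch : ch = p
    · subst hch
      have hrepl : List.replicate r ch ++ ch :: rest = List.replicate (r + 1) ch ++ rest := by
        rw [List.replicate_add]; simp
      simp only [beq_self_eq_true, if_true]
      by_cases hhit : 9 ≤ r + 1 ∧ pvHexStr.contains ch = true
      · rw [if_pos hhit]
        constructor
        · intro _
          refine ⟨ch, hhit.2, ?_⟩
          rw [hrepl]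
          have hpre : List.replicate 9 ch <+: List.replicate (r + 1) ch := by
            have : List.replicate (r + 1) ch = List.replicate 9 ch ++ List.replicate (r + 1 - 9) ch := by
              rw [← List.replicate_add]; congr 1; omega
            exact ⟨List.replicate (r + 1 - 9) ch, this.symm⟩
          exact (hpre.trans (List.prefix_append _ rest)).isInfix
        · intro _; rfl
      · rw [if_neg hhit]
        rw [ih ch (r + 1) (fun hc => by by_contra hlt; exact hhit ⟨by omega, hc⟩)]
        rw [hrepl]
    · have hbeq : (ch == p) = false := by simp [hch]
      simp only [hbeq, Bool.false_eq_true, if_false]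
      have h19 : ¬ (9 ≤ 1 ∧ pvHexStr.contains ch = true) := by rintro ⟨h, -⟩; omega
      rw [if_neg h19]
      rw [ih ch 1 (fun _ => by omega)]
      simp only [List.replicate_one, List.singleton_append]
      constructor
      · rintro ⟨c, hc, hinf⟩
        exact ⟨c, hc, hinf.trans (List.suffix_append (List.replicate r p) (ch :: rest)).isInfix⟩
      · rintro ⟨c, hc, hinf⟩
        refine ⟨c, hc, ?_⟩
        rcases pv_infix_append_cases hinf with h | h | ⟨u1, u2, hu, hne, hs, hp'⟩
        · -- inside the pending run: c = p and 9 ≤ r, impossible by the invariant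
          have h9 : (9 : Nat) ≤ r := by
            have := h.length_le; simpa using this
          have hcp : c = p := List.eq_of_mem_replicate (h.mem (by simp))
          exact absurd (hinv (hcp ▸ hc)) (by omega)
        · exact h
        · -- straddling occurrence: u1 forces c = p, u2 forces c = ch ≠ p
          have hcp : c = p := by
            obtain ⟨x, hx⟩ := hs
            have hmem : u1.head hne ∈ List.replicate r p := by
              rw [← hx]; exact List.mem_append_right x (List.head_mem hne)
            have hc1 : u1.head hne = c := by
              have : u1.head hne ∈ List.replicate 9 c := by
                rw [hu]; exact List.mem_append_left u2 (List.head_mem hne)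
              exact List.eq_of_mem_replicate this
            rw [← hc1]; exact List.eq_of_mem_replicate hmem
          by_cases hu2 : u2 = []
          · subst hu2
            have h9 : (9 : Nat) ≤ r := by
              have hlen := hs.length_le
              have hl1 : u1.length = 9 := by
                have := congrArg List.length hu; simpa using this.symm
              simp [hl1] at hlen; exact hlen
            exact absurd (hinv (hcp ▸ hc)) (by omega)
          · have hcch : c = ch := by
              obtain ⟨y, hy⟩ := hp'
              have : u2.head hu2 = ch := by
                have := congrArg (List.head? ·) hy
                simp [List.head?_append_of_ne_nil _ hu2, List.head?_eq_some_head hu2] at this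
                exact this
              have hc2 : u2.head hu2 = c := by
                have : u2.head hu2 ∈ List.replicate 9 c := by
                  rw [hu]
                  exact List.mem_append_right u1 (List.head_mem hu2)
                exact List.eq_of_mem_replicate this
              rw [← hc2, this]
            exact absurd (hcch.symm.trans hcp) hch

-- per-segment agreement: A's 16 substring tests = B's run-length scan
lemma pv_segment_agree (address : List Char) :
    pvHexList.any (fun c => PySem.Chars.isIn [c, c, c, c, c, c, c, c, c] (PySem.Chars.lower address))
      = pvScan (PySem.Chars.lower address) ',' 0 := by
  rw [Bool.eq_iff_iff]
  rw [pv_scan_spec _ ',' 0 (fun _ => by omega)]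
  simp only [List.replicate_zero, List.nil_append, List.any_eq_true]
  have hrepl : ∀ c : Char, [c, c, c, c, c, c, c, c, c] = List.replicate 9 c := fun c => rfl
  constructor
  · rintro ⟨c, hc, hin⟩
    refine ⟨c, ?_, ?_⟩
    · rw [pv_hex_eq, List.contains_iff_mem]; exact hc
    · rw [← hrepl c, ← PySem.Chars.isIn_iff_infix]; exact hin
  · rintro ⟨c, hc, hinf⟩
    refine ⟨c, ?_, ?_⟩
    · rw [pv_hex_eq, List.contains_iff_mem] at hc; exact hc
    · rw [PySem.Chars.isIn_iff_infix, hrepl c]; exact hinf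

-- ===== VERDICT (by name: the statement is the Claim_ definition above) =====
theorem is_address_spec : Claim_equal_is_address := by
  intro w3 addresses _
  unfold Spec_is_address is_address is_address_alt
  have hstep : ∀ (is_addr : Bool) (address : List Char),
      pvHexList.foldl
        (fun acc c =>
          let test_str := [c, c, c, c, c, c, c, c, c]
          if PySem.Chars.isIn test_str (PySem.Chars.lower address) then false else acc)
        is_addr
      = (is_addr && !(pvScan (PySem.Chars.lower address) ',' 0)) := by
    intro is_addr address
    rw [pv_foldl_flag pvHexList
      (fun c => PySem.Chars.isIn [c, c, c, c, c, c, c, c, c] (PySem.Chars.lower address)) is_addr]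
    rw [pv_segment_agree]
  simp only [hstep]
  rw [pv_foldl_outer]
  simp
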